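-- pv_equiv track=rewrite | github.com/nexodifyforyou/perizia-v5-after-gpt | backend/perizia_canonical_pipeline/llm_clarification_issue_pack.py | _has_valid_anchor_chain
-- ===== SOURCE A (Python) =====
-- from typing import Any, Dict, List, Optional, Sequence, Set, Tuple
--
-- def _page_within_scope(page: int, scope_context: Dict[str, Any]) -> bool:
--     start_page = scope_context.get("scope_start_page")
--     end_page = scope_context.get("scope_end_page")
--     if not isinstance(start_page, int) or not isinstance(end_page, int):
--         return False
--     return start_page <= page <= end_page
--
-- def _has_valid_anchor_chain(
--     pages: Sequence[int],
--     target_section_entry_pages: Sequence[Dict[str, Any]],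
--     scope_context: Dict[str, Any],
-- ) -> bool:
--     if target_section_entry_pages:
--         return True
--     if not pages:
--         return False
--     return all(_page_within_scope(page, scope_context) for page in pages)
-- ===== SOURCE B (Python) =====
-- def _has_valid_anchor_chain(pages, target_section_entry_pages, scope_context):
--     if target_section_entry_pages:
--         return True
--     if not pages:
--         return False
--     start_page = scope_context.get("scope_start_page")
--     end_page = scope_context.get("scope_end_page")
--     if not isinstance(start_page, int) or not isinstance(end_page, int):
--         return False
--     return start_page <= min(pages) and max(pages) <= end_page
-- ===== Notes on version B (the rewrite author's own statement) =====
-- stated objective: alternative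
-- what changed: Replaces the per-page all(_page_within_scope(...)) scan with a single bounds check after reading the scope once: compute min(pages) and max(pages) and compare only the two extremes against the interval, instead of looking up the scope dict and testing membership for every page.
import Mathlib
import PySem

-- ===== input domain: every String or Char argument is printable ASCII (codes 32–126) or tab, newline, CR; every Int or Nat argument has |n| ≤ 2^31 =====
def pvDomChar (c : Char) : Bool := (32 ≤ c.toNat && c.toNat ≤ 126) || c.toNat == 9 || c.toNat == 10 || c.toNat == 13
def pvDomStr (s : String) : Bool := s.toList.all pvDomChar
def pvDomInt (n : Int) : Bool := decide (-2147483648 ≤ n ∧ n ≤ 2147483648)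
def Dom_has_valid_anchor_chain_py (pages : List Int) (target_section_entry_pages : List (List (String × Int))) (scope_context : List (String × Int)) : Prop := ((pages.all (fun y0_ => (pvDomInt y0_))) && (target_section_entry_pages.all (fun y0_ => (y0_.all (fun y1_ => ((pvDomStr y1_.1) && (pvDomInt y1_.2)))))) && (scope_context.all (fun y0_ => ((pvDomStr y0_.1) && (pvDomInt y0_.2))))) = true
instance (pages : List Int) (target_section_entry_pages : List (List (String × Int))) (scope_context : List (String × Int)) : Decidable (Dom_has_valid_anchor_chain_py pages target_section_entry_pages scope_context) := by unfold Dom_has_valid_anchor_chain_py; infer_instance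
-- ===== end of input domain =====

-- B replaces the per-page scope-membership scan with one dict read and a min/max bounds check; return value only, no side effects.
-- ===== PORT A =====
-- helper: _page_within_scope (dict values are Int here, so 'isinstance(.., int)' = key present)
def page_within_scope (page : Int) (scope_context : List (String × Int)) : Bool :=
  match PySem.Dict.get? (PySem.Dict.mk scope_context) "scope_start_page", PySem.Dict.get? (PySem.Dict.mk scope_context) "scope_end_page" with
  | some start_page, some end_page => decide (start_page ≤ page) && decide (page ≤ end_page)
  | _, _ => false

def has_valid_anchor_chain_py (pages : List Int) (target_section_entry_pages : List (List (String × Int))) (scope_context : List (String × Int)) : Bool :=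
  if target_section_entry_pages ≠ [] then true
  else if pages = [] then false
  else pages.all (fun page => page_within_scope page scope_context)

-- ===== PORT B =====
def has_valid_anchor_chain_py_alt (pages : List Int) (target_section_entry_pages : List (List (String × Int))) (scope_context : List (String × Int)) : Bool :=
  if target_section_entry_pages ≠ [] then true
  else if pages = [] then false
  else
    match PySem.Dict.get? (PySem.Dict.mk scope_context) "scope_start_page", PySem.Dict.get? (PySem.Dict.mk scope_context) "scope_end_page" with
    | some start_page, some end_page =>
      match PySem.List.min? pages (fun x => x), PySem.List.max? pages (fun x => x) with
      | some lo, some hi => decide (start_page ≤ lo) && decide (hi ≤ end_page)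
      | _, _ => false
    | _, _ => false

-- ===== PRECONDITION & SPEC =====
def Spec_has_valid_anchor_chain_py (pages : List Int) (target_section_entry_pages : List (List (String × Int))) (scope_context : List (String × Int)) (out : Bool) : Prop := out = has_valid_anchor_chain_py_alt pages target_section_entry_pages scope_context
instance (pages : List Int) (target_section_entry_pages : List (List (String × Int))) (scope_context : List (String × Int)) (out : Bool) : Decidable (Spec_has_valid_anchor_chain_py pages target_section_entry_pages scope_context out) := by unfold Spec_has_valid_anchor_chain_py; infer_instance

-- ===== CLAIM (what is proved, stated in full; the proofs are below) =====
def Claim_equal_has_valid_anchor_chain_py : Prop := ∀ (pages : List Int) (target_section_entry_pages : List (List (String × Int))) (scope_context : List (String × Int)), Dom_has_valid_anchor_chain_py pages target_section_entry_pages scope_context → Spec_has_valid_anchor_chain_py pages target_section_entry_pages scope_context (has_valid_anchor_chain_py pages target_section_entry_pages scope_context)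

-- ===== LEMMAS AND PROOFS =====

lemma all_within_eq_minmax (pages : List Int) (s e : Int) (h : pages ≠ []) :
    (pages.all (fun page => decide (s ≤ page) && decide (page ≤ e))) =
    (match PySem.List.min? pages (fun x => x), PySem.List.max? pages (fun x => x) with
     | some lo, some hi => decide (s ≤ lo) && decide (hi ≤ e)
     | _, _ => false) := by
  obtain ⟨lo, hlo⟩ : ∃ lo, PySem.List.min? pages (fun x => x) = some lo := by
    cases hm : PySem.List.min? pages (fun x => x) with
    | none => exact absurd ((PySem.List.min?_eq_none_iff pages (fun x => x)).1 hm) h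
    | some lo => exact ⟨lo, rfl⟩
  obtain ⟨hi, hhi⟩ : ∃ hi, PySem.List.max? pages (fun x => x) = some hi := by
    cases hm : PySem.List.max? pages (fun x => x) with
    | none => exact absurd ((PySem.List.max?_eq_none_iff pages (fun x => x)).1 hm) h
    | some hi => exact ⟨hi, rfl⟩
  rw [hlo, hhi]
  rw [Bool.eq_iff_iff]
  simp only [List.all_eq_true, Bool.and_eq_true, decide_eq_true_eq]
  constructor
  · intro hall
    exact ⟨(hall lo (PySem.List.min?_mem hlo)).1, (hall hi (PySem.List.max?_mem hhi)).2⟩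
  · intro ⟨hs, he⟩ p hp
    exact ⟨le_trans hs (PySem.List.min?_isMin hlo p hp),
           le_trans (PySem.List.max?_isMax hhi p hp) he⟩

-- ===== VERDICT =====
theorem has_valid_anchor_chain_py_spec : Claim_equal_has_valid_anchor_chain_py := by
  intro pages tseps sc _
  unfold Spec_has_valid_anchor_chain_py has_valid_anchor_chain_py has_valid_anchor_chain_py_alt
  split_ifs with h1 h2
  · rfl
  · rfl
  · cases hs : PySem.Dict.get? (PySem.Dict.mk sc) "scope_start_page" with
    | none =>
      simp only [page_within_scope, hs]
      exact List.all_eq_false.2 ⟨_, (List.exists_mem_of_ne_nil pages h2).choose_spec, by simp⟩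
    | some s =>
      cases he : PySem.Dict.get? (PySem.Dict.mk sc) "scope_end_page" with
      | none =>
        simp only [page_within_scope, hs, he]
        exact List.all_eq_false.2 ⟨_, (List.exists_mem_of_ne_nil pages h2).choose_spec, by simp⟩
      | some e =>
        simp only [page_within_scope, hs, he]
        exact all_within_eq_minmax pages s e h2
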